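-- pv_equiv track=rewrite | github.com/Santiagolainen/ejercicios-AED | problema44.py | decode_trans
-- ===== SOURCE A (Python) =====
-- def check(msg, abc):
--     if msg is None or msg == '':
--         return False
--
--     for i in range(len(msg)):
--         if msg[i] != ' ' and msg[i] not in abc:
--             return False
--
--     return True
--
-- def decode_trans(msg, abc, trans):
--     if not check(msg, abc):
--         return None
--
--     b = []
--
--     for i in range(len(msg)):
--         if msg[i] == ' ':
--             b.append(' ')
--
--         else:
--             im = trans.find(msg[i])
--
--             b.append(abc[im])
--
--     mens = ''.join(b)
--     return mens
-- ===== SOURCE B (Python) =====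
-- def decode_trans(msg, abc, trans):
--     if not msg:
--         return None
--     # decode table: each alphabet letter maps back via its position in the cipher alphabet
--     dec = {}
--     for letter in abc:
--         i = trans.find(letter)
--         if 0 <= i < len(abc):
--             dec[letter] = abc[i]
--     out = []
--     for c in msg:
--         if c == ' ':
--             out.append(' ')
--         elif c in dec:
--             out.append(dec[c])
--         else:
--             return None
--     return ''.join(out)
-- ===== Notes on version B (the rewrite author's own statement) =====
-- stated objective: alternative
-- what changed: B precomputes a decode table once over the alphabet (one trans.find per alphabet letter) and then translates msg by pure table lookup, instead of A's separate validation pass followed by a transform pass that re-scans trans and abc for every message character; B also refuses (None) letters that were never encoded instead of A's accidental abc[-1].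
-- intended difference: On messages whose characters are all in abc (or spaces) but where some non-space character does not occur in trans, A returns a string with abc[-1] substituted at those positions (trans.find's -1 read as a negative index), while B returns None; an unencoded letter cannot be decoded, so None is the intended value. — e.g. on decode_trans("a", "ab", ""): A returns some "b", B returns none
import Mathlib
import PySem

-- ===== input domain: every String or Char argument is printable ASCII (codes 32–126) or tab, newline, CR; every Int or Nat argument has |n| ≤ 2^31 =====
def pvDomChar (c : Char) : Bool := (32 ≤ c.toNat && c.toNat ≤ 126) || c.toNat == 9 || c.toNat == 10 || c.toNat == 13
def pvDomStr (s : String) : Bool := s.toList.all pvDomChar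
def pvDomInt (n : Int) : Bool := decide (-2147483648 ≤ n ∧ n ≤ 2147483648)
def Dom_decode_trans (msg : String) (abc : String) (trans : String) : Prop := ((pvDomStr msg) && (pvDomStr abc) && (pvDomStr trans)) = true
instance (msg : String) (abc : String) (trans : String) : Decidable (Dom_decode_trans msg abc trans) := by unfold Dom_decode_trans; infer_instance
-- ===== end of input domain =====

-- B builds a decode table once over the alphabet (one trans.find per alphabet letter) and then
-- translates msg by pure table lookup; letters never encoded in trans decode to None (stated as
-- the intended difference D_ below) instead of A's accidental abc[-1].


-- ===== PORT A =====
-- check(msg, abc): the 'msg is None' test is unrepresentable for a Lean String and drops out;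
-- 'msg[i] not in abc' is single-character substring membership (PySem.Str.isIn).
def pvCheck (msg : String) (abc : String) : Bool :=
  if msg == "" then false
  else msg.toList.all (fun c => !((c != ' ') && !(PySem.Str.isIn (String.ofList [c]) abc)))

-- the transform loop: b.append(' ') / b.append(abc[trans.find(msg[i])]); every appended piece is a
-- single character, so b is accumulated as List Char and ''.join(b) is String.ofList; abc[im] out of
-- range (IndexError) is none, propagated.
def pvALoop (abc : String) (trans : String) : List Char → Option (List Char)
  | [] => some []
  | c :: cs =>
    if c == ' ' then (pvALoop abc trans cs).map (fun r => ' ' :: r)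
    else
      match PySem.Str.pyGet? abc (PySem.Str.find trans (String.ofList [c])) with
      | none => none
      | some ch => (pvALoop abc trans cs).map (fun r => ch :: r)

def decode_trans (msg : String) (abc : String) (trans : String) : Option String :=
  if pvCheck msg abc then (pvALoop abc trans msg.toList).map String.ofList else none

-- ===== PORT B =====
-- the table loop of Source B: for letter in abc: i = trans.find(letter); if 0 <= i < len(abc): dec[letter] = abc[i].
-- Under the guard abc[i] never raises, so the match's none branch is unreachable.
def pvStep (abc : String) (trans : String) (d : PySem.Dict Char Char) (a : Char) : PySem.Dict Char Char :=
  let i := PySem.Str.find trans (String.ofList [a])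
  if 0 ≤ i ∧ i < (abc.toList.length : Int) then
    match PySem.Str.pyGet? abc i with
    | some ch => d.insert a ch
    | none => d
  else d

def pvBDec (abc : String) (trans : String) : PySem.Dict Char Char :=
  abc.toList.foldl (pvStep abc trans) PySem.Dict.empty

-- the message loop: ' ' → ' ', c in dec → dec[c], otherwise return None.
def pvBLoop (dec : PySem.Dict Char Char) : List Char → Option (List Char)
  | [] => some []
  | c :: cs =>
    if c == ' ' then (pvBLoop dec cs).map (fun r => ' ' :: r)
    else
      match dec.get? c with
      | none => none
      | some ch => (pvBLoop dec cs).map (fun r => ch :: r)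

def decode_trans_alt (msg : String) (abc : String) (trans : String) : Option String :=
  if msg == "" then none
  else (pvBLoop (pvBDec abc trans) msg.toList).map String.ofList

-- ===== PRECONDITION & SPEC =====
-- Pre_ excludes exactly the inputs on which A raises IndexError: a msg that passes validation but
-- contains a character whose first index in trans is ≥ len(abc), reached by abc[im].
def Pre_decode_trans (msg : String) (abc : String) (trans : String) : Prop :=
  msg.toList.all (fun c => c == ' ' || abc.toList.contains c) = true →
    msg.toList.all (fun c =>
      c == ' ' || PySem.Str.find trans (String.ofList [c]) < (abc.toList.length : Int)) = true
instance (msg : String) (abc : String) (trans : String) : Decidable (Pre_decode_trans msg abc trans) := by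
  unfold Pre_decode_trans; infer_instance

def pvWitness_decode_trans : String × String × String := ("ab c", "abc", "cba")

-- On messages whose characters are all in abc (or spaces) but where some non-space character does
-- not occur in trans, A returns a string with abc[-1] substituted at those positions (trans.find's
-- -1 read as a negative index), while B returns None: an unencoded letter cannot be decoded.
def D_decode_trans (msg : String) (abc : String) (trans : String) : Prop :=
  let sa := PySem.Set.ofList abc.toList
  let st := PySem.Set.ofList trans.toList
  msg ≠ "" ∧
  msg.toList.all (fun c => c == ' ' || sa.contains c) = true ∧
  msg.toList.any (fun c => c != ' ' && !(st.contains c)) = true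
instance (msg : String) (abc : String) (trans : String) : Decidable (D_decode_trans msg abc trans) := by
  unfold D_decode_trans; infer_instance

def Spec_decode_trans (msg : String) (abc : String) (trans : String) (out : Option String) : Prop := ¬ D_decode_trans msg abc trans → out = decode_trans_alt msg abc trans
instance (msg : String) (abc : String) (trans : String) (out : Option String) : Decidable (Spec_decode_trans msg abc trans out) := by unfold Spec_decode_trans; infer_instance

def pvDiffWitness_decode_trans : String × String × String := ("a", "ab", "")
def pvDiffWitnessOut_decode_trans : (Option String) × (Option String) := (some "b", none)

-- ===== CLAIM (what is proved, stated in full; the proofs are below) =====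
def Claim_unchanged_decode_trans : Prop := ∀ (msg : String) (abc : String) (trans : String), Dom_decode_trans msg abc trans → Pre_decode_trans msg abc trans → Spec_decode_trans msg abc trans (decode_trans msg abc trans)
def Claim_changed_decode_trans : Prop := Dom_decode_trans (pvDiffWitness_decode_trans.1) (pvDiffWitness_decode_trans.2.1) (pvDiffWitness_decode_trans.2.2) ∧ Pre_decode_trans (pvDiffWitness_decode_trans.1) (pvDiffWitness_decode_trans.2.1) (pvDiffWitness_decode_trans.2.2) ∧ D_decode_trans (pvDiffWitness_decode_trans.1) (pvDiffWitness_decode_trans.2.1) (pvDiffWitness_decode_trans.2.2) ∧ decode_trans (pvDiffWitness_decode_trans.1) (pvDiffWitness_decode_trans.2.1) (pvDiffWitness_decode_trans.2.2) = pvDiffWitnessOut_decode_trans.1 ∧ decode_trans_alt (pvDiffWitness_decode_trans.1) (pvDiffWitness_decode_trans.2.1) (pvDiffWitness_decode_trans.2.2) = pvDiffWitnessOut_decode_trans.2 ∧ pvDiffWitnessOut_decode_trans.1 ≠ pvDiffWitnessOut_decode_trans.2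
def Claim_exact_decode_trans : Prop := ∀ (msg : String) (abc : String) (trans : String), Dom_decode_trans msg abc trans → Pre_decode_trans msg abc trans → D_decode_trans msg abc trans → decode_trans msg abc trans ≠ decode_trans_alt msg abc trans

-- ===== LEMMAS AND PROOFS =====

theorem pv_singleton_infix_iff (c : Char) (l : List Char) : [c] <:+: l ↔ c ∈ l := by
  constructor
  · intro h; exact h.mem (List.mem_singleton_self c)
  · intro h
    obtain ⟨s, t, rfl⟩ := List.append_of_mem h
    exact ⟨s, t, by simp⟩

theorem pv_singleton_prefix_iff (c : Char) (l : List Char) : [c] <+: l ↔ l.head? = some c := by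
  cases l with
  | nil => simp
  | cons a l =>
    simp only [List.head?_cons, Option.some.injEq, List.cons_prefix_cons, List.nil_prefix, and_true]
    exact eq_comm

theorem pv_idxOf_le (l : List Char) (c : Char) (k : Nat) (h : l[k]? = some c) : l.idxOf c ≤ k := by
  induction l generalizing k with
  | nil => simp at h
  | cons a l ih =>
    by_cases hac : a = c
    · simp [hac, List.idxOf_cons_self]
    · cases k with
      | zero => simp at h; exact absurd h hac
      | succ k => simpa [List.idxOf_cons, hac] using Nat.succ_le_succ (ih k (by simpa using h))

theorem pv_find_singleton (ts : List Char) (c : Char) :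
    PySem.Chars.find ts [c] = if c ∈ ts then (ts.idxOf c : Int) else -1 := by
  by_cases h : c ∈ ts
  · have hinf : [c] <:+: ts := (pv_singleton_infix_iff c ts).mpr h
    have h0 : 0 ≤ PySem.Chars.find ts [c] := (PySem.Chars.find_nonneg_iff ts [c]).mpr hinf
    obtain ⟨hpre, hmin⟩ := PySem.Chars.find_spec (s := ts) (sub := [c]) h0
    set k := (PySem.Chars.find ts [c]).toNat with hk
    have hget : ts[k]? = some c := by
      have := (pv_singleton_prefix_iff c (ts.drop k)).mp hpre
      simpa [List.head?_drop] using this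
    have hle : ts.idxOf c ≤ k := pv_idxOf_le ts c k hget
    have hlt : ts.idxOf c < ts.length := List.idxOf_lt_length_of_mem h
    have hge : k ≤ ts.idxOf c := by
      by_contra hgt
      push_neg at hgt
      exact hmin (ts.idxOf c) hgt ((pv_singleton_prefix_iff c _).mpr
        (by simp [List.head?_drop, List.getElem?_eq_getElem hlt, List.getElem_idxOf]))
    have : k = ts.idxOf c := Nat.le_antisymm hge hle
    simp [h, ← this, hk, Int.toNat_of_nonneg h0]
  · simp [h, (PySem.Chars.find_eq_neg_one_iff ts [c]).mpr
      (fun hinf => h ((pv_singleton_infix_iff c ts).mp hinf))]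

-- check's per-character test is 'c = ' ' ∨ c ∈ abc'
theorem pv_check_char (abc : String) (c : Char) :
    (!((c != ' ') && !(PySem.Str.isIn (String.ofList [c]) abc))) = true ↔ (c = ' ' ∨ c ∈ abc.toList) := by
  have hIs : PySem.Chars.isIn [c] abc.toList = true ↔ c ∈ abc.toList := by
    rw [PySem.Chars.isIn_iff_infix]; exact pv_singleton_infix_iff c abc.toList
  by_cases hc : c = ' '
  · simp [hc]
  · simp [hc, hIs]

theorem pv_set_mem (l : List Char) (c : Char) :
    PySem.Set.contains (PySem.Set.ofList l) c = true ↔ c ∈ l := by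
  simp [PySem.Set.contains_iff, PySem.Set.mem_ofList]

-- the per-letter table entry: what dec gets for letter a
def pvG (abc : String) (trans : String) (a : Char) : Option Char :=
  let i := PySem.Str.find trans (String.ofList [a])
  if 0 ≤ i ∧ i < (abc.toList.length : Int) then PySem.Str.pyGet? abc i else none

theorem pvStep_none (abc trans : String) (d : PySem.Dict Char Char) (a : Char)
    (h : pvG abc trans a = none) : pvStep abc trans d a = d := by
  simp only [pvStep]
  by_cases hg : 0 ≤ PySem.Str.find trans (String.ofList [a]) ∧
      PySem.Str.find trans (String.ofList [a]) < (abc.toList.length : Int)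
  · simp only [pvG] at h
    rw [if_pos hg] at h
    rw [if_pos hg, h]
  · rw [if_neg hg]

theorem pvStep_some (abc trans : String) (d : PySem.Dict Char Char) (a ch : Char)
    (h : pvG abc trans a = some ch) : pvStep abc trans d a = d.insert a ch := by
  have hg : 0 ≤ PySem.Str.find trans (String.ofList [a]) ∧
      PySem.Str.find trans (String.ofList [a]) < (abc.toList.length : Int) := by
    by_contra hg
    simp only [pvG] at h
    rw [if_neg hg] at h
    cases h
  simp only [pvG] at h
  rw [if_pos hg] at h
  simp only [pvStep]
  rw [if_pos hg, h]

theorem pv_foldl_get (abc trans : String) (l : List Char) (d : PySem.Dict Char Char) (c : Char) :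
    ((l.foldl (pvStep abc trans) d).get? c) =
    if c ∈ l ∧ (pvG abc trans c).isSome then pvG abc trans c else d.get? c := by
  induction l generalizing d with
  | nil => simp
  | cons a l ih =>
    rw [List.foldl_cons, ih]
    by_cases hc : c ∈ l ∧ (pvG abc trans c).isSome
    · rw [if_pos hc, if_pos ⟨List.mem_cons_of_mem a hc.1, hc.2⟩]
    · rw [if_neg hc]
      by_cases hac : a = c
      · subst hac
        cases hgv : pvG abc trans a with
        | none =>
          rw [pvStep_none abc trans d a hgv,
            if_neg (by rintro ⟨_, h2⟩; simp at h2)]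
        | some ch =>
          rw [pvStep_some abc trans d a ch hgv, PySem.Dict.get?_insert_self,
            if_pos ⟨List.mem_cons_self, rfl⟩]
      · have hstep : (pvStep abc trans d a).get? c = d.get? c := by
          cases hgv : pvG abc trans a with
          | none => rw [pvStep_none abc trans d a hgv]
          | some ch =>
            rw [pvStep_some abc trans d a ch hgv]
            exact PySem.Dict.get?_insert_of_ne _ _ (fun h => hac h.symm)
        rw [hstep, if_neg (by rintro ⟨h, h2⟩; exact hc ⟨(List.mem_cons.mp h).resolve_left (fun h => hac h.symm), h2⟩)]

theorem pv_dec_get? (abc trans : String) (c : Char) :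
    (pvBDec abc trans).get? c =
      if c ∈ abc.toList ∧ (pvG abc trans c).isSome then pvG abc trans c else none := by
  unfold pvBDec
  rw [pv_foldl_get]
  simp

-- on a valid message with no D_ character and in-range finds, the two loops agree
theorem pv_loops_eq (abc trans : String) (l : List Char)
    (hval : ∀ c ∈ l, c = ' ' ∨ c ∈ abc.toList)
    (hidx : ∀ c ∈ l, c ≠ ' ' → PySem.Str.find trans (String.ofList [c]) < (abc.toList.length : Int))
    (htr : ∀ c ∈ l, c ≠ ' ' → c ∈ trans.toList) :
    pvALoop abc trans l = pvBLoop (pvBDec abc trans) l := by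
  induction l with
  | nil => simp [pvALoop, pvBLoop]
  | cons c cs ih =>
    have ihr := ih (fun x hx => hval x (List.mem_cons_of_mem c hx))
      (fun x hx => hidx x (List.mem_cons_of_mem c hx))
      (fun x hx => htr x (List.mem_cons_of_mem c hx))
    by_cases hc : c = ' '
    · simp [pvALoop, pvBLoop, hc, ihr]
    · have hmem : c ∈ abc.toList := (hval c List.mem_cons_self).resolve_left hc
      have hfind : PySem.Str.find trans (String.ofList [c]) = PySem.Chars.find trans.toList [c] := by simp
      have hge : 0 ≤ PySem.Str.find trans (String.ofList [c]) := by
        rw [hfind, pv_find_singleton, if_pos (htr c List.mem_cons_self hc)]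
        exact Int.natCast_nonneg _
      have hlt := hidx c List.mem_cons_self hc
      have hguard : 0 ≤ PySem.Str.find trans (String.ofList [c]) ∧
          PySem.Str.find trans (String.ofList [c]) < (abc.toList.length : Int) := ⟨hge, hlt⟩
      have hct : c ∈ trans.toList := htr c List.mem_cons_self hc
      have hsome : (PySem.Str.pyGet? abc (PySem.Str.find trans (String.ofList [c]))).isSome := by
        rw [hfind, pv_find_singleton, if_pos hct]
        have hn : trans.toList.idxOf c < abc.toList.length := by
          rw [hfind, pv_find_singleton, if_pos hct] at hlt
          exact_mod_cast hlt
        simp [PySem.Str.pyGet?, PySem.List.pyGet?_natCast, List.getElem?_eq_getElem hn]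
      have hgv : pvG abc trans c = PySem.Str.pyGet? abc (PySem.Str.find trans (String.ofList [c])) := by
        simp only [pvG]
        rw [if_pos hguard]
      have hdec : (pvBDec abc trans).get? c =
          PySem.Str.pyGet? abc (PySem.Str.find trans (String.ofList [c])) := by
        rw [pv_dec_get?, if_pos ⟨hmem, by rw [hgv]; exact hsome⟩, hgv]
      rw [pvALoop, pvBLoop, if_neg (by simpa using hc), if_neg (by simpa using hc), hdec, ihr]

-- with a non-space character outside abc somewhere, B's loop returns none
theorem pv_bloop_none (abc trans : String) (l : List Char)
    (hbad : ∃ c ∈ l, c ≠ ' ' ∧ (pvBDec abc trans).get? c = none) :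
    pvBLoop (pvBDec abc trans) l = none := by
  induction l with
  | nil => simp at hbad
  | cons c cs ih =>
    obtain ⟨x, hx, hxs, hxn⟩ := hbad
    rw [pvBLoop]
    rcases List.mem_cons.mp hx with rfl | hx
    · rw [if_neg (by simpa using hxs), hxn]
    · have hrec := ih ⟨x, hx, hxs, hxn⟩
      by_cases hc : c = ' '
      · simp [hc, hrec]
      · rw [if_neg (by simpa using hc)]
        cases (pvBDec abc trans).get? c <;> simp [hrec]

-- on a valid message with in-range finds, A's loop returns some
theorem pv_aloop_some (abc trans : String) (l : List Char)
    (hval : ∀ c ∈ l, c = ' ' ∨ c ∈ abc.toList)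
    (hidx : ∀ c ∈ l, c ≠ ' ' → PySem.Str.find trans (String.ofList [c]) < (abc.toList.length : Int)) :
    ∃ r, pvALoop abc trans l = some r := by
  induction l with
  | nil => exact ⟨[], rfl⟩
  | cons c cs ih =>
    obtain ⟨r, hr⟩ := ih (fun x hx => hval x (List.mem_cons_of_mem c hx))
      (fun x hx => hidx x (List.mem_cons_of_mem c hx))
    by_cases hc : c = ' '
    · exact ⟨' ' :: r, by simp [pvALoop, hc, hr]⟩
    · have hmem : c ∈ abc.toList := (hval c List.mem_cons_self).resolve_left hc
      have hne : abc.toList ≠ [] := by rintro h; rw [h] at hmem; simp at hmem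
      have hfind : PySem.Str.find trans (String.ofList [c]) = PySem.Chars.find trans.toList [c] := by simp
      have hsome : (PySem.Str.pyGet? abc (PySem.Str.find trans (String.ofList [c]))).isSome := by
        rw [hfind, pv_find_singleton]
        by_cases hct : c ∈ trans.toList
        · rw [if_pos hct]
          have hlt := hidx c List.mem_cons_self hc
          rw [hfind, pv_find_singleton, if_pos hct] at hlt
          have hn : trans.toList.idxOf c < abc.toList.length := by exact_mod_cast hlt
          simp [PySem.Str.pyGet?, PySem.List.pyGet?_natCast, List.getElem?_eq_getElem hn]
        · rw [if_neg hct]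
          simp [PySem.Str.pyGet?, PySem.List.pyGet?_neg_one,
            List.getLast?_eq_getLast_of_ne_nil hne]
      obtain ⟨ch, hch⟩ := Option.isSome_iff_exists.mp hsome
      exact ⟨ch :: r, by rw [pvALoop, if_neg (by simpa using hc), hch, hr]; rfl⟩

-- a D_ witness character kills B's loop: its find is -1, so its table entry is missing
theorem pv_d_char_none (abc trans : String) (c : Char) (hct : c ∉ trans.toList) :
    (pvBDec abc trans).get? c = none := by
  rw [pv_dec_get?]
  have hg : pvG abc trans c = none := by
    unfold pvG
    have : PySem.Str.find trans (String.ofList [c]) = -1 := by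
      simp [pv_find_singleton, hct]
    rw [if_neg (by rw [this]; rintro ⟨h, _⟩; omega)]
  simp [hg]

-- ===== VERDICT (by name: the statement is the Claim_ definition above) =====
theorem decode_trans_spec : Claim_unchanged_decode_trans := by
  intro msg abc trans _ hpre hD
  unfold decode_trans decode_trans_alt
  by_cases hnil : msg = ""
  · subst hnil; simp [pvCheck]
  · by_cases hval : ∀ c ∈ msg.toList, c = ' ' ∨ c ∈ abc.toList
    · have hchk : pvCheck msg abc = true := by
        unfold pvCheck
        rw [if_neg (by simpa using hnil), List.all_eq_true]
        intro c hc; exact (pv_check_char abc c).mpr (hval c hc)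
      have hall : msg.toList.all (fun c => c == ' ' || abc.toList.contains c) = true := by
        rw [List.all_eq_true]
        intro x hx
        rcases hval x hx with h | h <;> simp [h]
      have hidx : ∀ c ∈ msg.toList, c ≠ ' ' →
          PySem.Str.find trans (String.ofList [c]) < (abc.toList.length : Int) := by
        intro c hc hcs
        have h2 := hpre hall
        rw [List.all_eq_true] at h2
        simpa [hcs] using h2 c hc
      have hallS : msg.toList.all
          (fun c => c == ' ' || (PySem.Set.ofList abc.toList).contains c) = true := by
        rw [List.all_eq_true]
        intro x hx
        rcases hval x hx with h | h
        · simp [h]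
        · simp [PySem.Set.contains_iff, PySem.Set.mem_ofList, h]
      have htr : ∀ c ∈ msg.toList, c ≠ ' ' → c ∈ trans.toList := by
        intro c hc hcs
        by_contra hct
        have hcf : (PySem.Set.ofList trans.toList).contains c = false :=
          Bool.eq_false_iff.mpr (fun h => hct ((pv_set_mem trans.toList c).mp h))
        exact hD ⟨hnil, hallS, List.any_eq_true.mpr ⟨c, hc, by rw [Bool.and_eq_true, hcf]; simp [hcs]⟩⟩
      rw [if_pos hchk, if_neg (by simpa using hnil),
        pv_loops_eq abc trans msg.toList hval hidx htr]
    · push_neg at hval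
      obtain ⟨x, hx, hxv⟩ := hval
      have hchk : pvCheck msg abc = false := by
        unfold pvCheck
        rw [if_neg (by simpa using hnil)]
        refine List.all_eq_false.mpr ⟨x, hx, ?_⟩
        rw [Bool.not_eq_true, Bool.eq_false_iff]
        intro h; rcases (pv_check_char abc x).mp h with h' | h'
        · exact hxv.1 h'
        · exact hxv.2 h'
      have hnone : (pvBDec abc trans).get? x = none := by
        rw [pv_dec_get?, if_neg (by rintro ⟨h, _⟩; exact hxv.2 h)]
      rw [if_neg (by simp [hchk]), if_neg (by simpa using hnil),
        pv_bloop_none abc trans msg.toList ⟨x, hx, hxv.1, hnone⟩]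
      rfl

theorem decode_trans_changed : Claim_changed_decode_trans := by
  unfold Claim_changed_decode_trans; decide

theorem decode_trans_tight : Claim_exact_decode_trans := by
  intro msg abc trans _ hpre hD
  obtain ⟨hnil, hallS, hany⟩ := hD
  have hval : ∀ c ∈ msg.toList, c = ' ' ∨ c ∈ abc.toList := by
    intro c hc
    have := List.all_eq_true.mp hallS c hc
    simpa [PySem.Set.contains_iff, PySem.Set.mem_ofList] using this
  have hall : msg.toList.all (fun c => c == ' ' || abc.toList.contains c) = true := by
    rw [List.all_eq_true]
    intro x hx
    rcases hval x hx with h | h <;> simp [h]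
  have hidx : ∀ c ∈ msg.toList, c ≠ ' ' →
      PySem.Str.find trans (String.ofList [c]) < (abc.toList.length : Int) := by
    intro c hc hcs
    have h2 := hpre hall
    rw [List.all_eq_true] at h2
    simpa [hcs] using h2 c hc
  obtain ⟨x, hx, hxb⟩ := List.any_eq_true.mp hany
  simp only [Bool.and_eq_true, bne_iff_ne, Bool.not_eq_true'] at hxb
  have hxs : x ≠ ' ' := hxb.1
  have hxt : x ∉ trans.toList := fun h => by
    rw [(pv_set_mem trans.toList x).mpr h] at hxb
    exact Bool.true_eq_false.mp hxb.2
  have hchk : pvCheck msg abc = true := by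
    unfold pvCheck
    rw [if_neg (by simpa using hnil), List.all_eq_true]
    intro c hc; exact (pv_check_char abc c).mpr (hval c hc)
  obtain ⟨r, hr⟩ := pv_aloop_some abc trans msg.toList hval hidx
  have hB : pvBLoop (pvBDec abc trans) msg.toList = none :=
    pv_bloop_none abc trans msg.toList ⟨x, hx, hxs, pv_d_char_none abc trans x hxt⟩
  unfold decode_trans decode_trans_alt
  rw [if_pos hchk, if_neg (by simpa using hnil), hr, hB]
  simp
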